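-- pv_equiv track=rewrite | github.com/oi-silva/synoptic-paper-engine | spe/pdf_content_filter.py | find_term_indices
-- ===== SOURCE A (Python) =====
-- def find_term_indices(text_words, term):
--     """Locates indices of a specific term within the tokenized text."""
--     indices = []
--     # Logic 1: Exact Phrase Matching (*term*)
--     if term.startswith("*") and term.endswith("*"):
--         clean_phrase = term.strip("*").lower()
--         phrase_words = clean_phrase.split()
--         if not phrase_words: return []
--         first_word = phrase_words[0]
--         phrase_len = len(phrase_words)
--         for i, word in enumerate(text_words):
--             if word == first_word:
--                 if text_words[i:i+phrase_len] == phrase_words: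
--                     indices.append(i)
--     # Logic 2: Loose Token Matching
--     else:
--         clean_term = term.lower()
--         for i, word in enumerate(text_words):
--             if clean_term in word:
--                 indices.append(i)
--     return indices
-- ===== SOURCE B (Python) =====
-- def find_term_indices(text_words, term):
--     """Column-wise candidate filtering: the phrase branch iterates over the
--     PATTERN positions, narrowing one candidate list, instead of re-slicing the
--     text at every first-word hit."""
--     if term.startswith("*") and term.endswith("*"):
--         phrase_words = term.strip("*").lower().split()
--         if not phrase_words:
--             return []
--         n = len(text_words)
--         positions = list(range(n))
--         for j, pw in enumerate(phrase_words):
--             positions = [p for p in positions if p + j < n and text_words[p + j] == pw]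
--         return positions
--     clean_term = term.lower()
--     return [i for i, word in enumerate(text_words) if clean_term in word]
-- ===== Notes on version B (the rewrite author's own statement) =====
-- stated objective: alternative
-- what changed: The phrase branch no longer scans the text and re-slices it at every first-word hit; instead it keeps one candidate-position list and narrows it column by column with an outer loop over the pattern positions, and the token branch becomes a single comprehension.
import Mathlib
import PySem

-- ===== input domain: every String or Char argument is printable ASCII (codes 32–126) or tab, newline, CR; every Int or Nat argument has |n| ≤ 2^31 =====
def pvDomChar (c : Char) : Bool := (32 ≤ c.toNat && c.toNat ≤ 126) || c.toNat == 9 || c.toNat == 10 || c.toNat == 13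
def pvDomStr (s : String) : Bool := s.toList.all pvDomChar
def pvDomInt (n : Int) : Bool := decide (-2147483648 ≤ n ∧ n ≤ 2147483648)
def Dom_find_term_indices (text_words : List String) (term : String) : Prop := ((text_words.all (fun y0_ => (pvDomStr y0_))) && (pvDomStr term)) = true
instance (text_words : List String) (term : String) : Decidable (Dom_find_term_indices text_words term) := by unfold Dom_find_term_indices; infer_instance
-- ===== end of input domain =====

-- B replaces A's per-hit text re-slicing with column-wise narrowing of one candidate-index
-- list (outer loop over the pattern positions); same results, alternative algorithm.

-- ===== PORT A =====
def find_term_indices (text_words : List String) (term : String) : List Int :=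
  if PySem.Str.startswith term "*" && PySem.Str.endswith term "*" then
    -- Logic 1: Exact Phrase Matching (*term*)
    let clean_phrase := PySem.Str.lower (PySem.Str.stripChars term "*")
    let phrase_words := PySem.Str.split₀ clean_phrase
    if phrase_words.isEmpty then []
    else
      let first_word := phrase_words.headD ""   -- phrase_words[0], guarded by the emptiness test
      let phrase_len : Int := phrase_words.length
      (PySem.List.enumerate text_words).foldl
        (fun indices iw =>
          if iw.2 == first_word &&
             (PySem.List.slice text_words (some iw.1) (some (iw.1 + phrase_len)) == phrase_words)
          then indices ++ [iw.1] else indices) []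
  else
    -- Logic 2: Loose Token Matching
    let clean_term := PySem.Str.lower term
    (PySem.List.enumerate text_words).foldl
      (fun indices iw => if PySem.Str.isIn clean_term iw.2 then indices ++ [iw.1] else indices) []

-- ===== PORT B =====
def find_term_indices_alt (text_words : List String) (term : String) : List Int :=
  if PySem.Str.startswith term "*" && PySem.Str.endswith term "*" then
    let phrase_words := PySem.Str.split₀ (PySem.Str.lower (PySem.Str.stripChars term "*"))
    if phrase_words.isEmpty then []
    else
      let n : Int := text_words.length
      (PySem.List.enumerate phrase_words).foldl
        (fun positions jpw =>
          positions.filter (fun p =>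
            decide (p + jpw.1 < n) && (PySem.List.pyGet? text_words (p + jpw.1) == some jpw.2)))
        (PySem.List.pyRange 0 n 1)
  else
    let clean_term := PySem.Str.lower term
    ((PySem.List.enumerate text_words).filter (fun iw => PySem.Str.isIn clean_term iw.2)).map
      (fun iw => iw.1)

-- ===== PRECONDITION & SPEC =====
def Spec_find_term_indices (text_words : List String) (term : String) (out : List Int) : Prop := out = find_term_indices_alt text_words term
instance (text_words : List String) (term : String) (out : List Int) : Decidable (Spec_find_term_indices text_words term out) := by unfold Spec_find_term_indices; infer_instance

-- ===== CLAIM (what is proved, stated in full; the proofs are below) =====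
def Claim_equal_find_term_indices : Prop := ∀ (text_words : List String) (term : String), Dom_find_term_indices text_words term → Spec_find_term_indices text_words term (find_term_indices text_words term)

-- ===== LEMMAS AND PROOFS =====

-- B's loop of filters is one filter by the conjunction of all the column tests.
theorem foldl_filter_eq_filter_all {α β : Type} (l : List β) (g : β → α → Bool)
    (P : List α) :
    l.foldl (fun acc x => acc.filter (g x)) P = P.filter (fun p => l.all (fun x => g x p)) := by
  induction l generalizing P with
  | nil => simp
  | cons x t ih =>
      simp only [List.foldl_cons, ih, List.filter_filter, List.all_cons]
      exact List.filter_congr (fun p _ => by simp [Bool.and_comm])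

-- Element-wise characterisation of a window equality (A's slice test).
theorem drop_take_eq_iff {α : Type} (xs ys : List α) (i : Nat) :
    (xs.drop i).take ys.length = ys ↔
      ∀ j, j < ys.length → (i + j < xs.length ∧ xs[i + j]? = ys[j]?) := by
  constructor
  · intro h j hj
    have hg : ((xs.drop i).take ys.length)[j]? = ys[j]? := by rw [h]
    rw [List.getElem?_take, List.getElem?_drop, if_pos hj] at hg
    have hs : ys[j]? = some ys[j] := List.getElem?_eq_getElem hj
    obtain ⟨hlt, -⟩ := List.getElem?_eq_some_iff.mp (hg.trans hs)
    exact ⟨hlt, hg⟩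
  · intro h
    apply List.ext_getElem?
    intro j
    rw [List.getElem?_take, List.getElem?_drop]
    split
    · exact (h j ‹_›).2
    · exact (List.getElem?_eq_none (by omega)).symm

-- At one text position, A's first-word + slice test equals B's conjunction of column tests.
theorem point_eq (text : List String) (fw : String) (rest : List String) (m : Nat) :
    ((text.getD m "" == fw) &&
      (PySem.List.slice text (some (m : Int)) (some ((m : Int) + ((fw :: rest).length : Int))) == fw :: rest))
    = (PySem.List.enumerate (fw :: rest)).all
        (fun jpw => decide ((m : Int) + jpw.1 < (text.length : Int)) &&
          (PySem.List.pyGet? text ((m : Int) + jpw.1) == some jpw.2)) := by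
  apply Bool.eq_iff_iff.mpr
  rw [PySem.List.slice_natCast_add text m (fw :: rest).length]
  simp only [Bool.and_eq_true, beq_iff_eq, List.all_eq_true, decide_eq_true_eq]
  constructor
  · rintro ⟨hfw, hsl⟩ jpw hmem
    rw [PySem.List.mem_enumerate_iff] at hmem
    obtain ⟨k, hk, rfl⟩ := hmem
    obtain ⟨h1, h2⟩ := (drop_take_eq_iff text (fw :: rest) m).mp hsl k hk
    dsimp only
    constructor
    · simp only [zero_add]; exact_mod_cast h1
    · simp only [zero_add]
      rw [show ((m : Int) + (k : Int)) = ((m + k : Nat) : Int) by push_cast; ring,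
        PySem.List.pyGet?_natCast, h2, List.getElem?_eq_getElem hk]
  · intro hall
    have key : ∀ j, j < (fw :: rest).length → (m + j < text.length ∧ text[m + j]? = (fw :: rest)[j]?) := by
      intro j hj
      have hmem : (((j : Int)), (fw :: rest)[j]) ∈ PySem.List.enumerate (fw :: rest) := by
        rw [PySem.List.mem_enumerate_iff]; exact ⟨j, hj, by simp⟩
      obtain ⟨h1, h2⟩ := hall _ hmem
      dsimp only at h1 h2
      refine ⟨by exact_mod_cast h1, ?_⟩
      rw [show ((m : Int) + (j : Int)) = ((m + j : Nat) : Int) by push_cast; ring,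
        PySem.List.pyGet?_natCast] at h2
      rw [h2, List.getElem?_eq_getElem hj]
    obtain ⟨hm0, he0⟩ := key 0 (by simp)
    refine ⟨?_, (drop_take_eq_iff text (fw :: rest) m).mpr key⟩
    simp only [Nat.add_zero] at hm0 he0
    rw [List.getD_eq_getElem?_getD, he0]
    rfl

-- The whole phrase branch: A's scan-and-slice loop equals B's column-wise filtering.
theorem phrase_branch (text : List String) (fw : String) (rest : List String) :
    (PySem.List.enumerate text).foldl
      (fun indices iw =>
        if iw.2 == (fw :: rest).headD "" &&
           (PySem.List.slice text (some iw.1) (some (iw.1 + (((fw :: rest).length : Nat) : Int))) == fw :: rest)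
        then indices ++ [iw.1] else indices) []
    = (PySem.List.enumerate (fw :: rest)).foldl
        (fun positions jpw =>
          positions.filter (fun p =>
            decide (p + jpw.1 < (text.length : Int)) &&
              (PySem.List.pyGet? text (p + jpw.1) == some jpw.2)))
        (PySem.List.pyRange 0 (text.length : Int) 1) := by
  rw [PySem.List.foldl_append_if, List.nil_append, foldl_filter_eq_filter_all,
    PySem.List.enumerate_eq_map_pyRange text "", List.filter_map, List.map_map]
  dsimp only [Function.comp_def]
  rw [List.map_id']
  apply List.filter_congr
  intro p hp
  rw [PySem.List.mem_pyRange_one] at hp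
  lift p to ℕ using hp.1 with m
  rw [PySem.List.pyGetD_natCast]
  exact point_eq text fw rest m

-- ===== VERDICT (by name: the statement is the Claim_ definition above) =====
theorem find_term_indices_spec : Claim_equal_find_term_indices := by
  intro text term _
  unfold Spec_find_term_indices
  simp only [find_term_indices, find_term_indices_alt]
  by_cases hc : (PySem.Str.startswith term "*" && PySem.Str.endswith term "*") = true
  · rw [if_pos hc, if_pos hc]
    generalize PySem.Str.split₀ (PySem.Str.lower (PySem.Str.stripChars term "*")) = pw
    cases pw with
    | nil => rfl
    | cons fw rest =>
        rw [if_neg (by simp), if_neg (by simp)]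
        exact phrase_branch text fw rest
  · rw [if_neg hc, if_neg hc]
    rw [PySem.List.foldl_append_if, List.nil_append]
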